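-- pv_equiv track=rewrite | github.com/Karan-Chaurasia/AI-resume-analyser | backend/ai_hr_analyser.py | _are_similar_skills
-- ===== SOURCE A (Python) =====
-- def _are_similar_skills(skill1: str, skill2: str) -> bool:
--     """Check if skills are similar (e.g., React and React.js)"""
--     similar_pairs = [
--         ("javascript", "js"), ("typescript", "ts"), ("react", "reactjs"),
--         ("node.js", "nodejs"), ("vue.js", "vuejs"), ("angular", "angularjs"),
--         ("postgresql", "postgres"), ("mongodb", "mongo")
--     ]
--
--     for pair in similar_pairs:
--         if (skill1 in pair and skill2 in pair) or (skill2 in pair and skill1 in pair):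
--             return True
--     return False
-- ===== SOURCE B (Python) =====
-- # B: precomputed skill -> group-id dict; decision is two lookups + comparison (no loop over pairs).
-- _GROUP = {
--     "javascript": 0, "js": 0,
--     "typescript": 1, "ts": 1,
--     "react": 2, "reactjs": 2,
--     "node.js": 3, "nodejs": 3,
--     "vue.js": 4, "vuejs": 4,
--     "angular": 5, "angularjs": 5,
--     "postgresql": 6, "postgres": 6,
--     "mongodb": 7, "mongo": 7,
-- }
--
-- def _are_similar_skills(skill1: str, skill2: str) -> bool:
--     """Check if skills are similar (e.g., React and React.js)"""
--     g = _GROUP.get(skill1)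
--     return g is not None and _GROUP.get(skill2) == g
-- ===== Notes on version B (the rewrite author's own statement) =====
-- stated objective: idiomatic
-- what changed: Replaces the loop over synonym pairs (with pair-membership tests) by a precomputed skill-to-group-id dict: the decision is two constant-time lookups and one comparison, no iteration.
import Mathlib
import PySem

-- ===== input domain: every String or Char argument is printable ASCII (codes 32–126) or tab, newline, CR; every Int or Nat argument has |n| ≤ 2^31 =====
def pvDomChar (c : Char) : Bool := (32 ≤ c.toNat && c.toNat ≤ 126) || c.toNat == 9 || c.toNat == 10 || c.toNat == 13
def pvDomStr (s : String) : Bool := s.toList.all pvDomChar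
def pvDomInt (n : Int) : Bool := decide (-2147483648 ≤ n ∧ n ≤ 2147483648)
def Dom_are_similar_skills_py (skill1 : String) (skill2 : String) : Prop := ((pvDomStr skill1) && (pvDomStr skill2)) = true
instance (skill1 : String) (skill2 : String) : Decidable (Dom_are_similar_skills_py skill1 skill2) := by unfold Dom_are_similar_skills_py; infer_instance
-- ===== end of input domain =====

-- B replaces A's loop over synonym pairs by a precomputed skill → group-id dict (two lookups + a comparison); return values proved equal on all inputs.

-- ===== PORT A =====
def pvSimilarPairs : List (String × String) :=
  [("javascript", "js"), ("typescript", "ts"), ("react", "reactjs"),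
   ("node.js", "nodejs"), ("vue.js", "vuejs"), ("angular", "angularjs"),
   ("postgresql", "postgres"), ("mongodb", "mongo")]

-- 'skill in pair' on a 2-tuple is equality with either component
def pvLoopA (skill1 skill2 : String) : List (String × String) → Bool
  | [] => false
  | p :: rest =>
    if ((skill1 == p.1 || skill1 == p.2) && (skill2 == p.1 || skill2 == p.2)) ||
       ((skill2 == p.1 || skill2 == p.2) && (skill1 == p.1 || skill1 == p.2)) then
      true
    else
      pvLoopA skill1 skill2 rest

def are_similar_skills_py (skill1 : String) (skill2 : String) : Bool :=
  pvLoopA skill1 skill2 pvSimilarPairs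

-- ===== PORT B =====
def pvGroup : PySem.Dict String Int :=
  PySem.Dict.ofList
    [("javascript", 0), ("js", 0), ("typescript", 1), ("ts", 1),
     ("react", 2), ("reactjs", 2), ("node.js", 3), ("nodejs", 3),
     ("vue.js", 4), ("vuejs", 4), ("angular", 5), ("angularjs", 5),
     ("postgresql", 6), ("postgres", 6), ("mongodb", 7), ("mongo", 7)]

def are_similar_skills_py_alt (skill1 : String) (skill2 : String) : Bool :=
  match pvGroup.get? skill1 with
  | none => false
  | some g => pvGroup.get? skill2 == some g

-- ===== PRECONDITION & SPEC =====
def Spec_are_similar_skills_py (skill1 : String) (skill2 : String) (out : Bool) : Prop := out = are_similar_skills_py_alt skill1 skill2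
instance (skill1 : String) (skill2 : String) (out : Bool) : Decidable (Spec_are_similar_skills_py skill1 skill2 out) := by unfold Spec_are_similar_skills_py; infer_instance

-- ===== CLAIM (what is proved, stated in full; the proofs are below) =====
def Claim_equal_are_similar_skills_py : Prop := ∀ (skill1 : String) (skill2 : String), Dom_are_similar_skills_py skill1 skill2 → Spec_are_similar_skills_py skill1 skill2 (are_similar_skills_py skill1 skill2)

-- ===== LEMMAS AND PROOFS =====
def pvKeys : List String :=
  ["javascript", "js", "typescript", "ts", "react", "reactjs", "node.js", "nodejs",
   "vue.js", "vuejs", "angular", "angularjs", "postgresql", "postgres", "mongodb", "mongo"]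

theorem pvGroup_mk : pvGroup = PySem.Dict.mk
    [("javascript", 0), ("js", 0), ("typescript", 1), ("ts", 1),
     ("react", 2), ("reactjs", 2), ("node.js", 3), ("nodejs", 3),
     ("vue.js", 4), ("vuejs", 4), ("angular", 5), ("angularjs", 5),
     ("postgresql", 6), ("postgres", 6), ("mongodb", 7), ("mongo", 7)] := by rfl

-- ===== VERDICT (by name: the statement is the Claim_ definition above) =====
set_option maxHeartbeats 4000000 in
theorem are_similar_skills_py_spec : Claim_equal_are_similar_skills_py := by
  intro s1 s2 _
  unfold Spec_are_similar_skills_py are_similar_skills_py are_similar_skills_py_alt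
  by_cases h1 : s1 ∈ pvKeys
  · by_cases h2 : s2 ∈ pvKeys
    · fin_cases h1 <;> fin_cases h2 <;> rfl
    · simp only [pvKeys, List.mem_cons, List.not_mem_nil, or_false] at h2
      push Not at h2
      obtain ⟨n1, n2, n3, n4, n5, n6, n7, n8, n9, n10, n11, n12, n13, n14, n15, n16⟩ := h2
      fin_cases h1 <;>
        simp [pvLoopA, pvSimilarPairs, pvGroup_mk, PySem.Dict.get?,
              n1, n2, n3, n4, n5, n6, n7, n8, n9, n10, n11, n12, n13, n14, n15, n16, n1.symm, n2.symm, n3.symm, n4.symm, n5.symm, n6.symm, n7.symm, n8.symm, n9.symm, n10.symm, n11.symm, n12.symm, n13.symm, n14.symm, n15.symm, n16.symm]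
  · simp only [pvKeys, List.mem_cons, List.not_mem_nil, or_false] at h1
    push Not at h1
    obtain ⟨n1, n2, n3, n4, n5, n6, n7, n8, n9, n10, n11, n12, n13, n14, n15, n16⟩ := h1
    simp [pvLoopA, pvSimilarPairs, pvGroup_mk, PySem.Dict.get?,
          n1, n2, n3, n4, n5, n6, n7, n8, n9, n10, n11, n12, n13, n14, n15, n16, n1.symm, n2.symm, n3.symm, n4.symm, n5.symm, n6.symm, n7.symm, n8.symm, n9.symm, n10.symm, n11.symm, n12.symm, n13.symm, n14.symm, n15.symm, n16.symm]
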